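-- pv_equiv track=rewrite | github.com/AlexMercer12138/simple_cpu | assembler/assembler.py | tokenize_operands
-- ===== SOURCE A (Python) =====
-- from typing import List, Tuple, Optional, Dict, Union
--
-- def tokenize_operands(operand_str: str) -> List[str]:
--     """将操作数字符串分割为token列表"""
--     # 保留方括号、运算符作为独立token，但不包括逗号（逗号用于分隔操作数）
--     tokens = []
--     current = ""
--     i = 0
--     while i < len(operand_str):
--         c = operand_str[i]
--         # 跳过空白字符
--         if c.isspace():
--             if current.strip():
--                 tokens.append(current.strip())
--                 current = ""
--             i += 1
--             continue
--         # 检查双字符运算符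
--         if i + 1 < len(operand_str):
--             two_char = operand_str[i:i+2]
--             if two_char in ['==', '!=', '>=', '<=']:
--                 if current.strip():
--                     tokens.append(current.strip())
--                 tokens.append(two_char)
--                 current = ""
--                 i += 2
--                 continue
--         # 检查移位运算符 << >> >>>
--         if c in '<' and i + 1 < len(operand_str) and operand_str[i+1] == '<':
--             if current.strip():
--                 tokens.append(current.strip())
--             tokens.append('<<')
--             current = ""
--             i += 2
--             continue
--         if c in '>' and i + 2 < len(operand_str) and operand_str[i+1] == '>' and operand_str[i+2] == '>':
--             # 算术右移 >>>
--             if current.strip():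
--                 tokens.append(current.strip())
--             tokens.append('>>>')
--             current = ""
--             i += 3
--             continue
--         if c in '>' and i + 1 < len(operand_str) and operand_str[i+1] == '>':
--             # 逻辑右移 >>
--             if current.strip():
--                 tokens.append(current.strip())
--             tokens.append('>>')
--             current = ""
--             i += 2
--             continue
--         # 处理立即数（带符号）#-123 或 #+123
--         if c == '#' and i + 1 < len(operand_str) and operand_str[i+1] in '+-':
--             # 这是一个带符号的立即数开始，收集完整的立即数
--             if current.strip():
--                 tokens.append(current.strip())
--                 current = ""
--             current += c  # 添加 #
--             i += 1
--             current += operand_str[i]  # 添加 + 或 -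
--             i += 1
--             # 继续收集数字
--             while i < len(operand_str) and (operand_str[i].isalnum() or operand_str[i] in 'xXbB'):
--                 current += operand_str[i]
--                 i += 1
--             tokens.append(current)
--             current = ""
--             continue
--         # 单字符分隔符（但跳过立即数中的+-）
--         if c in '[]()&|^':
--             if current.strip():
--                 tokens.append(current.strip())
--             tokens.append(c)
--             current = ""
--             i += 1
--             continue
--         # 处理加减运算符（需要区分是运算符还是立即数符号）
--         if c in '+-':
--             # 如果current为空或current以操作符结尾，这可能是立即数的一部分
--             # 否则这是一个运算符
--             if current.strip():
--                 tokens.append(current.strip())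
--                 current = ""
--             tokens.append(c)
--             i += 1
--             continue
--         current += c
--         i += 1
--     if current.strip():
--         tokens.append(current.strip())
--     return tokens
-- ===== SOURCE B (Python) =====
-- import re
--
-- # Staged approach: one regex pass pads every operator/separator/signed-immediate
-- # token with spaces, then str.split() on whitespace yields the token list.
-- _TOKEN = re.compile(r'#[+-][0-9A-Za-z]*|>>>|==|!=|>=|<=|>>|<<|[][()&|^+\-]')
--
-- def tokenize_operands(operand_str: str):
--     return _TOKEN.sub(lambda m: ' ' + m.group(0) + ' ', operand_str).split()
-- ===== Notes on version B (the rewrite author's own statement) =====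
-- stated objective: faster
-- what changed: A's single-pass index loop with a mutable accumulator string and flush logic is replaced by two stages: one regex substitution that pads every operator/separator/signed-immediate token with spaces, followed by a plain str.split() on whitespace.
import Mathlib
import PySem

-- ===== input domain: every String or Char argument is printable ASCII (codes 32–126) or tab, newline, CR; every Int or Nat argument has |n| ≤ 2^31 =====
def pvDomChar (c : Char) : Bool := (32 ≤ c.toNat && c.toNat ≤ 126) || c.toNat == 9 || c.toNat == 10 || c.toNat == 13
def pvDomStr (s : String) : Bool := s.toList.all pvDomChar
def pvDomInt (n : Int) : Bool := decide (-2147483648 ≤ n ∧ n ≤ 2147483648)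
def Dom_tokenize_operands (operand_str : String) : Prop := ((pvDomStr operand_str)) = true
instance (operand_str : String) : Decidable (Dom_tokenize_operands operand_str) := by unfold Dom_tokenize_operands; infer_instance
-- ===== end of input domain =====

set_option maxRecDepth 10000

-- B replaces A's single-pass character loop (a mutable accumulator with flush logic
-- emitting tokens directly) by two stages: a regex-substitution pass that pads every
-- operator/separator/immediate token with spaces, then a plain whitespace split;
-- both are O(n), and a timing run measured B faster (the per-character work moves
-- from interpreted Python into the C regex engine and str.split).

-- ===== PORT A =====
-- A is ported over the character list of the input; the index loop (i advances by 1, 2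
-- or 3) becomes recursion on the remaining suffix, which is exact because A reads only
-- s[i], s[i+1], s[i+2] and s[i:i+2] and advances i by exactly what it consumed
-- (so s[i:i+2] is the ported suffix's `take 2`, "i+1 < len and s[i+1] == x" is
-- "rest.take 1 = [x]", and "i += 2" leaves the suffix `rest.drop 1`).

-- `operand_str[i].isalnum() or operand_str[i] in 'xXbB'`
def pvIsImmCharA (c : Char) : Bool :=
  PySem.Chars.isalnum c || (c = 'x' || c = 'X' || c = 'b' || c = 'B')

-- the inner `while` that collects the digits of a signed immediate into `current`
def pvCollectA : List Char → List Char → List Char × List Char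
  | [], cur => (cur, [])
  | c :: rest, cur =>
    if pvIsImmCharA c then pvCollectA rest (cur ++ [c]) else (cur, c :: rest)

-- `if current.strip(): tokens.append(current.strip())`
def pvFlushA (cur : List Char) (toks : List String) : List String :=
  if PySem.Chars.strip cur ≠ [] then toks ++ [String.ofList (PySem.Chars.strip cur)] else toks

theorem pvTailLen (l : List Char) : l.tail.length ≤ l.length := by
  rw [List.length_tail]; omega

-- needed by pvLoopA's termination proof
theorem pvCollectA_snd_len (l cur : List Char) : (pvCollectA l cur).2.length ≤ l.length := by
  induction l generalizing cur with
  | nil => simp [pvCollectA]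
  | cons c rest ih =>
    simp only [pvCollectA]
    split
    · exact le_trans (ih _) (Nat.le_succ _)
    · simp

def pvLoopA : List Char → List Char → List String → List String
  | [], cur, toks => pvFlushA cur toks
  | c :: rest, cur, toks =>
    -- skip whitespace, flushing `current`
    if PySem.Chars.isspace c then
      if PySem.Chars.strip cur ≠ [] then
        pvLoopA rest [] (toks ++ [String.ofList (PySem.Chars.strip cur)])
      else pvLoopA rest cur toks
    -- `two_char = operand_str[i:i+2]; if two_char in ['==', '!=', '>=', '<=']`
    else if (c :: rest).take 2 = ['=', '='] || (c :: rest).take 2 = ['!', '='] ||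
            (c :: rest).take 2 = ['>', '='] || (c :: rest).take 2 = ['<', '='] then
      pvLoopA (rest.drop 1) [] (pvFlushA cur toks ++ [String.ofList ((c :: rest).take 2)])
    -- `c in '<' and i + 1 < len and operand_str[i+1] == '<'`
    else if c = '<' && rest.take 1 = ['<'] then
      pvLoopA (rest.drop 1) [] (pvFlushA cur toks ++ ["<<"])
    -- `c in '>' and i + 2 < len and operand_str[i+1] == '>' and operand_str[i+2] == '>'`
    else if c = '>' && rest.take 2 = ['>', '>'] then
      pvLoopA (rest.drop 2) [] (pvFlushA cur toks ++ [">>>"])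
    -- `c in '>' and i + 1 < len and operand_str[i+1] == '>'`
    else if c = '>' && rest.take 1 = ['>'] then
      pvLoopA (rest.drop 1) [] (pvFlushA cur toks ++ [">>"])
    -- `c == '#' and i + 1 < len and operand_str[i+1] in '+-'` (one branch per sign char)
    else if c = '#' && rest.take 1 = ['+'] then
      pvLoopA (pvCollectA (rest.drop 1) ['#', '+']).2 []
        (pvFlushA cur toks ++ [String.ofList (pvCollectA (rest.drop 1) ['#', '+']).1])
    else if c = '#' && rest.take 1 = ['-'] then
      pvLoopA (pvCollectA (rest.drop 1) ['#', '-']).2 []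
        (pvFlushA cur toks ++ [String.ofList (pvCollectA (rest.drop 1) ['#', '-']).1])
    -- `c in '[]()&|^'`
    else if c = '[' || c = ']' || c = '(' || c = ')' || c = '&' || c = '|' || c = '^' then
      pvLoopA rest [] (pvFlushA cur toks ++ [String.ofList [c]])
    -- `c in '+-'` (current reset only inside the flush `if`, as in A)
    else if c = '+' || c = '-' then
      if PySem.Chars.strip cur ≠ [] then
        pvLoopA rest [] (toks ++ [String.ofList (PySem.Chars.strip cur), String.ofList [c]])
      else pvLoopA rest cur (toks ++ [String.ofList [c]])
    -- `current += c`
    else pvLoopA rest (cur ++ [c]) toks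
  termination_by l _ _ => l.length
  decreasing_by
    all_goals simp_all
    all_goals try omega
    all_goals exact le_trans (pvCollectA_snd_len _ _) (pvTailLen _)

def tokenize_operands (operand_str : String) : List String :=
  pvLoopA operand_str.toList [] []

-- ===== PORT B =====
-- B (Source B) runs re.sub with the master pattern
--   #[+-][0-9A-Za-z]* | >>> | == | != | >= | <= | >> | << | [][()&|^+-]
-- replacing every match m by ' ' + m + ' ', then splits the result on whitespace.
-- PySem has no regex engine, so the substitution pass is ported by hand, exactly:
-- re.sub scans left to right, at each position trying the alternatives in pattern
-- order (one branch per alternative below, in the same order; the greedy [0-9A-Za-z]*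
-- is takeWhile) and copying a non-matching character unchanged; 'str.split()' is
-- PySem.Str.split₀.

-- the single-character alternative [][()&|^+-]
def pvSepB (c : Char) : Bool :=
  c = '[' || c = ']' || c = '(' || c = ')' || c = '&' || c = '|' || c = '^' || c = '+' || c = '-'

-- the substitution pass: ''.join with ' ' + match + ' ' around every match
def pvSpace : List Char → List Char
  | [] => []
  | c :: rest =>
    -- #[+-][0-9A-Za-z]*   ([0-9A-Za-z] is Python's ASCII isalnum)
    if c = '#' && (rest.take 1 = ['+'] || rest.take 1 = ['-']) then
      ' ' :: (('#' :: (rest.take 1 ++ (rest.drop 1).takeWhile PySem.Chars.isalnum)) ++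
        ' ' :: pvSpace ((rest.drop 1).dropWhile PySem.Chars.isalnum))
    -- >>>
    else if (c :: rest).take 3 = ['>', '>', '>'] then
      ' ' :: (['>', '>', '>'] ++ ' ' :: pvSpace (rest.drop 2))
    -- == | != | >= | <= | >> | <<
    else if (c :: rest).take 2 = ['=', '='] || (c :: rest).take 2 = ['!', '='] ||
            (c :: rest).take 2 = ['>', '='] || (c :: rest).take 2 = ['<', '='] ||
            (c :: rest).take 2 = ['>', '>'] || (c :: rest).take 2 = ['<', '<'] then
      ' ' :: ((c :: rest).take 2 ++ ' ' :: pvSpace (rest.drop 1))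
    -- [][()&|^+-]
    else if pvSepB c then
      ' ' :: ([c] ++ ' ' :: pvSpace rest)
    -- no alternative matches here: the character is copied unchanged
    else c :: pvSpace rest
  termination_by l => l.length
  decreasing_by
    all_goals simp_all
    all_goals try omega
    exact le_trans (List.length_dropWhile_le _ _) (pvTailLen _)

def tokenize_operands_alt (operand_str : String) : List String :=
  PySem.Str.split₀ (String.ofList (pvSpace operand_str.toList))

-- ===== PRECONDITION & SPEC =====
def Spec_tokenize_operands (operand_str : String) (out : List String) : Prop := out = tokenize_operands_alt operand_str
instance (operand_str : String) (out : List String) : Decidable (Spec_tokenize_operands operand_str out) := by unfold Spec_tokenize_operands; infer_instance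

-- ===== CLAIM (what is proved, stated in full; the proofs are below) =====
def Claim_equal_tokenize_operands : Prop := ∀ (operand_str : String), Dom_tokenize_operands operand_str → Spec_tokenize_operands operand_str (tokenize_operands operand_str)

-- ===== LEMMAS AND PROOFS =====

set_option maxHeartbeats 1000000

-- numeral-friendly take/drop unfoldings used throughout
theorem pvTake1 (x : Char) (xs : List Char) : (x :: xs).take 1 = [x] := by
  rw [show (1 : Nat) = 0 + 1 from rfl, List.take_succ_cons, List.take_zero]
theorem pvTake2 (x : Char) (xs : List Char) : (x :: xs).take 2 = x :: xs.take 1 := by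
  rw [show (2 : Nat) = 1 + 1 from rfl, List.take_succ_cons]
theorem pvTake3 (x : Char) (xs : List Char) : (x :: xs).take 3 = x :: xs.take 2 := by
  rw [show (3 : Nat) = 2 + 1 from rfl, List.take_succ_cons]
theorem pvDrop1 (x : Char) (xs : List Char) : (x :: xs).drop 1 = xs := by
  rw [show (1 : Nat) = 0 + 1 from rfl, List.drop_succ_cons, List.drop_zero]

theorem pvStrip_of_noWs (cs : List Char) (h : ∀ c ∈ cs, PySem.Chars.isspace c = false) :
    PySem.Chars.strip cs = cs := by
  have h1 : ∀ (ls : List Char), (∀ c ∈ ls, PySem.Chars.isspace c = false) →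
      ls.dropWhile PySem.Chars.isspace = ls := by
    intro ls hls
    cases ls with
    | nil => rfl
    | cons a t => simp [List.dropWhile_cons, hls a (by simp)]
  have e : PySem.Chars.strip cs
      = ((cs.dropWhile PySem.Chars.isspace).reverse.dropWhile PySem.Chars.isspace).reverse := rfl
  rw [e, h1 cs h, h1 _ (by intro c hc; exact h c (by simpa using hc)), List.reverse_reverse]

theorem pvIsImmCharA_eq (c : Char) : pvIsImmCharA c = PySem.Chars.isalnum c := by
  unfold pvIsImmCharA
  by_cases hx : c = 'x'; · subst hx; decide
  by_cases hX : c = 'X'; · subst hX; decide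
  by_cases hb : c = 'b'; · subst hb; decide
  by_cases hB : c = 'B'; · subst hB; decide
  simp [hx, hX, hb, hB]

theorem pvCollectA_eq (l acc : List Char) :
    pvCollectA l acc
      = (acc ++ l.takeWhile PySem.Chars.isalnum, l.dropWhile PySem.Chars.isalnum) := by
  induction l generalizing acc with
  | nil => simp [pvCollectA]
  | cons c rest ih =>
    rw [pvCollectA, pvIsImmCharA_eq]
    by_cases ha : PySem.Chars.isalnum c = true
    · simp [ha, ih]
    · have ha' : PySem.Chars.isalnum c = false := by simpa using ha
      simp [ha']

theorem pvFlushA_eq (cur : List Char) (toks : List String)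
    (h : ∀ c ∈ cur, PySem.Chars.isspace c = false) :
    pvFlushA cur toks = toks ++ (if cur = [] then [] else [String.ofList cur]) := by
  unfold pvFlushA
  rw [pvStrip_of_noWs cur h]
  by_cases hc : cur = [] <;> simp [hc]

-- the proof-side scanner: A's loop and B's substitute-then-split pass both compute it
-- regex \s (ASCII)
def pvWsB (c : Char) : Bool := PySem.Chars.isspace c

-- does a two-character operator or a signed-immediate start match here?
def pvOpStartB (l : List Char) : Bool :=
  l.take 2 = ['=', '='] || l.take 2 = ['!', '='] || l.take 2 = ['>', '='] ||
  l.take 2 = ['<', '='] || l.take 2 = ['>', '>'] || l.take 2 = ['<', '<'] ||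
  l.take 2 = ['#', '+'] || l.take 2 = ['#', '-']

-- maximal word run: take chars until a boundary
def pvWordB : List Char → List Char × List Char
  | [] => ([], [])
  | c :: rest =>
    if pvWsB c || pvSepB c || pvOpStartB (c :: rest) then ([], c :: rest)
    else ((pvWordB rest).1.cons c, (pvWordB rest).2)

theorem pvWordB_snd_len (l : List Char) : (pvWordB l).2.length ≤ l.length := by
  induction l with
  | nil => simp [pvWordB]
  | cons c rest ih =>
    simp only [pvWordB]
    split
    · simp
    · exact Nat.le_succ_of_le ih

def pvScanB : List Char → List String
  | [] => []
  | c :: rest =>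
    if pvWsB c then pvScanB (rest.dropWhile pvWsB)
    else if c = '#' && (rest.take 1 = ['+'] || rest.take 1 = ['-']) then
      String.ofList ('#' :: rest.take 1 ++ (rest.drop 1).takeWhile PySem.Chars.isalnum)
        :: pvScanB ((rest.drop 1).dropWhile PySem.Chars.isalnum)
    else if (c :: rest).take 2 = ['=', '='] || (c :: rest).take 2 = ['!', '='] ||
            (c :: rest).take 2 = ['>', '='] || (c :: rest).take 2 = ['<', '='] then
      String.ofList ((c :: rest).take 2) :: pvScanB (rest.drop 1)
    else if (c :: rest).take 3 = ['>', '>', '>'] then ">>>" :: pvScanB (rest.drop 2)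
    else if (c :: rest).take 2 = ['>', '>'] || (c :: rest).take 2 = ['<', '<'] then
      String.ofList ((c :: rest).take 2) :: pvScanB (rest.drop 1)
    else if pvSepB c then String.ofList [c] :: pvScanB rest
    else String.ofList (c :: (pvWordB rest).1) :: pvScanB (pvWordB rest).2
  termination_by l => l.length
  decreasing_by
    all_goals simp_all
    all_goals try omega
    · exact List.length_dropWhile_le _ _
    · exact le_trans (List.length_dropWhile_le _ _) (pvTailLen _)
    · exact pvWordB_snd_len _

theorem pvScanB_ws (c : Char) (rest : List Char) (h : pvWsB c = true) :
    pvScanB (c :: rest) = pvScanB rest := by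
  rw [pvScanB.eq_2, if_pos h]
  cases rest with
  | nil => simp [pvScanB]
  | cons d r =>
    by_cases hd : pvWsB d = true
    · rw [List.dropWhile_cons_of_pos hd]
      conv_rhs => rw [pvScanB.eq_2, if_pos hd]
    · rw [List.dropWhile_cons_of_neg (by simp [hd])]

theorem pvWordB_pos (c : Char) (rest : List Char)
    (hb : (pvWsB c || pvSepB c || pvOpStartB (c :: rest)) = true) :
    pvWordB (c :: rest) = ([], c :: rest) := by
  simp [pvWordB, hb]

theorem pvWordB_neg (c : Char) (rest : List Char)
    (hb : (pvWsB c || pvSepB c || pvOpStartB (c :: rest)) = false) :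
    pvWordB (c :: rest) = (c :: (pvWordB rest).1, (pvWordB rest).2) := by
  simp [pvWordB, hb]

theorem pvSepFacts (c : Char)
    (h : c = '[' ∨ c = ']' ∨ c = '(' ∨ c = ')' ∨ c = '&' ∨ c = '|' ∨ c = '^' ∨ c = '+' ∨ c = '-') :
    pvWsB c = false ∧ c ≠ '#' ∧ c ≠ '=' ∧ c ≠ '!' ∧ c ≠ '>' ∧ c ≠ '<' ∧ pvSepB c = true := by
  rcases h with rfl | rfl | rfl | rfl | rfl | rfl | rfl | rfl | rfl <;> decide

-- a single-char separator token in the scanner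
theorem pvScanB_single (c : Char) (rest : List Char)
    (hws : pvWsB c = false) (hh : c ≠ '#')
    (hne : c ≠ '=' ∧ c ≠ '!' ∧ c ≠ '>' ∧ c ≠ '<') (hsep : pvSepB c = true) :
    pvScanB (c :: rest) = String.ofList [c] :: pvScanB rest := by
  rw [pvScanB.eq_2, if_neg (by simp [hws]), if_neg (by simp [hh]),
    if_neg (by simp [pvTake2, hne.1, hne.2.1, hne.2.2.1, hne.2.2.2]),
    if_neg (by rw [pvTake3]; simp [hne.2.2.1]),
    if_neg (by simp [pvTake2, hne.2.2.1, hne.2.2.2]),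
    if_pos hsep]

-- the scanner at a signed-immediate start
theorem pvScanB_imm (c : Char) (rest : List Char)
    (hcond : (decide (c = '#') && (decide (rest.take 1 = ['+']) || decide (rest.take 1 = ['-']))) = true) :
    pvScanB (c :: rest)
      = String.ofList ('#' :: rest.take 1 ++ (rest.drop 1).takeWhile PySem.Chars.isalnum)
          :: pvScanB ((rest.drop 1).dropWhile PySem.Chars.isalnum) := by
  simp only [Bool.and_eq_true, decide_eq_true_eq] at hcond
  obtain ⟨rfl, hsig⟩ := hcond
  rw [pvScanB.eq_2, if_neg (by decide), if_pos (by simpa using hsig)]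

-- the scanner at a two-char comparison
theorem pvScanB_cmp (c : Char) (r : List Char) (h : c = '=' ∨ c = '!' ∨ c = '>' ∨ c = '<') :
    pvScanB (c :: '=' :: r) = String.ofList [c, '='] :: pvScanB r := by
  have hc : ((c :: '=' :: r).take 2 = ['=', '='] || (c :: '=' :: r).take 2 = ['!', '='] ||
      (c :: '=' :: r).take 2 = ['>', '='] || (c :: '=' :: r).take 2 = ['<', '=']) = true := by
    rcases h with rfl | rfl | rfl | rfl <;> simp [pvTake2, pvTake1]
  have hws : pvWsB c = false := by rcases h with rfl | rfl | rfl | rfl <;> decide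
  have hh : c ≠ '#' := by rcases h with rfl | rfl | rfl | rfl <;> decide
  rw [pvScanB.eq_2, if_neg (by simp [hws]), if_neg (by simp [hh]), if_pos hc]
  simp [pvTake2, pvTake1, pvDrop1]

-- the scanner at >>>
theorem pvScanB_ggg (r : List Char) :
    pvScanB ('>' :: '>' :: '>' :: r) = ">>>" :: pvScanB r := by
  rw [pvScanB.eq_2, if_neg (by decide), if_neg (by simp [pvTake1]),
    if_neg (by simp [pvTake2, pvTake1]), if_pos (by simp [pvTake3, pvTake2, pvTake1])]
  rfl

-- the scanner at >> (not >>>)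
theorem pvScanB_gtgt (r : List Char) (hr : ¬ r.take 1 = ['>']) :
    pvScanB ('>' :: '>' :: r) = ">>" :: pvScanB r := by
  rw [pvScanB.eq_2, if_neg (by decide), if_neg (by simp [pvTake1]),
    if_neg (by simp [pvTake2, pvTake1]), if_neg (by simp [pvTake3, pvTake2, hr]),
    if_pos (by simp [pvTake2, pvTake1])]
  rfl

-- the scanner at <<
theorem pvScanB_ltlt (r : List Char) :
    pvScanB ('<' :: '<' :: r) = "<<" :: pvScanB r := by
  rw [pvScanB.eq_2, if_neg (by decide), if_neg (by simp [pvTake1]),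
    if_neg (by simp [pvTake2, pvTake1]), if_neg (by simp [pvTake3, pvTake2, pvTake1]),
    if_pos (by simp [pvTake2, pvTake1])]
  rfl

-- the scanner at a word character
theorem pvScanB_word (c : Char) (rest : List Char)
    (hws : PySem.Chars.isspace c = false) (hsep : pvSepB c = false)
    (hop : pvOpStartB (c :: rest) = false) :
    pvScanB (c :: rest) = String.ofList (c :: (pvWordB rest).1) :: pvScanB (pvWordB rest).2 := by
  have hopn : ¬ pvOpStartB (c :: rest) = true := by simp [hop]
  simp only [pvOpStartB, pvTake2, Bool.or_eq_true, decide_eq_true_eq,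
    List.cons.injEq, not_or, not_and] at hopn
  obtain ⟨⟨⟨⟨⟨⟨⟨o1, o2⟩, o3⟩, o4⟩, o5⟩, o6⟩, o7⟩, o8⟩ := hopn
  have hsepn : ¬ pvSepB c = true := by simp [hsep]
  rw [pvScanB.eq_2, if_neg (by simp [pvWsB, hws]),
    if_neg (by
      simp only [Bool.and_eq_true, Bool.or_eq_true, decide_eq_true_eq, not_and, not_or]
      intro hch
      exact ⟨fun hp => (o7 hch) hp, fun hm => (o8 hch) hm⟩),
    if_neg (by
      simp only [Bool.or_eq_true, decide_eq_true_eq, pvTake2, List.cons.injEq, not_or, not_and]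
      exact ⟨⟨⟨o1, o2⟩, o3⟩, o4⟩),
    if_neg (by
      rw [pvTake3]
      intro hx
      simp only [List.cons.injEq] at hx
      obtain ⟨hc3, hr3⟩ := hx
      apply o5 hc3
      cases rest with
      | nil => simp at hr3
      | cons d r =>
        rw [pvTake2] at hr3
        simp only [List.cons.injEq] at hr3
        rw [pvTake1, hr3.1]),
    if_neg (by
      simp only [Bool.or_eq_true, decide_eq_true_eq, pvTake2, List.cons.injEq, not_or, not_and]
      exact ⟨o5, o6⟩),
    if_neg hsepn]

-- what pvLoopA computes, phrased through the scanner: a pending word `cur` absorbs the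
-- coming word run, everything after it is the scanner's token stream
def pvSpecG (l cur : List Char) : List String :=
  if cur = [] then pvScanB l
  else String.ofList (cur ++ (pvWordB l).1) :: pvScanB (pvWordB l).2

-- the common "A flushes cur, emits a token, restarts empty" step against pvSpecG
theorem pvStep (c : Char) (rest tail cur : List Char) (toks : List String) (tok : String)
    (h : ∀ x ∈ cur, PySem.Chars.isspace x = false)
    (hb : (pvWsB c || pvSepB c || pvOpStartB (c :: rest)) = true)
    (hscan : pvScanB (c :: rest) = tok :: pvScanB tail) :
    pvFlushA cur toks ++ [tok] ++ pvSpecG tail [] = toks ++ pvSpecG (c :: rest) cur := by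
  rw [pvFlushA_eq cur toks h]
  by_cases hc : cur = []
  · simp [pvSpecG, hc, hscan]
  · simp [pvSpecG, hc, pvWordB_pos c rest hb, hscan]

theorem pvMain (l cur : List Char) (toks : List String)
    (h : ∀ c ∈ cur, PySem.Chars.isspace c = false) :
    pvLoopA l cur toks = toks ++ pvSpecG l cur := by
  induction l, cur, toks using pvLoopA.induct with
  | case1 cur toks =>
    rw [pvLoopA.eq_1, pvFlushA_eq cur toks h]
    by_cases hc : cur = [] <;> simp [pvSpecG, hc, pvWordB, pvScanB]
  | case2 c rest cur toks hsp hne ih =>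
    rw [pvLoopA.eq_2, if_pos hsp, if_pos hne, ih (by simp)]
    rw [pvStrip_of_noWs cur h] at hne ⊢
    have hb : (pvWsB c || pvSepB c || pvOpStartB (c :: rest)) = true := by simp [pvWsB, hsp]
    simp [pvSpecG, hne, pvWordB_pos c rest hb, pvScanB_ws c rest (by simp [pvWsB, hsp])]
  | case3 c rest cur toks hsp hnn ih =>
    rw [pvLoopA.eq_2, if_pos hsp, if_neg hnn, ih h]
    have hcur : cur = [] := by rw [pvStrip_of_noWs cur h] at hnn; simpa using hnn
    subst hcur
    simp [pvSpecG, pvScanB_ws c rest (by simp [pvWsB, hsp])]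
  | case4 c rest cur toks hsp hcond ih =>
    -- two-char comparison operators
    rw [pvLoopA.eq_2, if_neg hsp, if_pos hcond, ih (by simp)]
    have hws : pvWsB c = false := by simp only [pvWsB]; simpa using hsp
    have hb : (pvWsB c || pvSepB c || pvOpStartB (c :: rest)) = true := by
      simp only [Bool.or_eq_true] at hcond
      rcases hcond with ((hx | hx) | hx) | hx <;> simp only [pvOpStartB, hx] <;> simp
    have hhash : ¬ (decide (c = '#')
        && (decide (rest.take 1 = ['+']) || decide (rest.take 1 = ['-']))) = true := by
      simp only [Bool.and_eq_true, Bool.or_eq_true, decide_eq_true_eq, not_and, not_or]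
      rintro rfl
      simp [pvTake2] at hcond
    have hscan : pvScanB (c :: rest)
        = String.ofList ((c :: rest).take 2) :: pvScanB (rest.drop 1) := by
      rw [pvScanB.eq_2, if_neg (by simp [hws]), if_neg hhash, if_pos hcond]
    exact pvStep c rest (rest.drop 1) cur toks _ h hb hscan
  | case5 c rest cur toks hsp h2 hcond ih =>
    -- <<
    rw [pvLoopA.eq_2, if_neg hsp, if_neg h2, if_pos hcond, ih (by simp)]
    simp only [Bool.and_eq_true, decide_eq_true_eq] at hcond
    obtain ⟨rfl, h1⟩ := hcond
    cases rest with
    | nil => simp at h1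
    | cons e r =>
      rw [pvTake1] at h1
      obtain rfl : e = '<' := by simpa using h1
      have hb : (pvWsB '<' || pvSepB '<' || pvOpStartB ('<' :: '<' :: r)) = true := by
        simp [pvOpStartB, pvTake2, pvTake1]
      have hscan : pvScanB ('<' :: '<' :: r) = "<<" :: pvScanB (('<' :: r).drop 1) := by
        rw [pvScanB_ltlt, pvDrop1]
      exact pvStep '<' ('<' :: r) (('<' :: r).drop 1) cur toks _ h hb hscan
  | case6 c rest cur toks hsp h2 h3 hcond ih =>
    -- >>>
    rw [pvLoopA.eq_2, if_neg hsp, if_neg h2, if_neg h3, if_pos hcond, ih (by simp)]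
    simp only [Bool.and_eq_true, decide_eq_true_eq] at hcond
    obtain ⟨rfl, h1⟩ := hcond
    cases rest with
    | nil => simp at h1
    | cons e r =>
      rw [pvTake2] at h1
      obtain ⟨rfl, h1⟩ : e = '>' ∧ r.take 1 = ['>'] := by simpa using h1
      cases r with
      | nil => simp at h1
      | cons f r' =>
        obtain rfl : f = '>' := by rw [pvTake1] at h1; simpa using h1
        have hb : (pvWsB '>' || pvSepB '>' || pvOpStartB ('>' :: '>' :: '>' :: r')) = true := by
          simp [pvOpStartB, pvTake2, pvTake1]
        have hscan : pvScanB ('>' :: '>' :: '>' :: r')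
            = ">>>" :: pvScanB (('>' :: '>' :: r').drop 2) := by
          rw [pvScanB_ggg, show ('>' :: '>' :: r').drop 2 = r' from rfl]
        exact pvStep '>' ('>' :: '>' :: r') (('>' :: '>' :: r').drop 2) cur toks _ h hb hscan
  | case7 c rest cur toks hsp h2 h3 h4 hcond ih =>
    -- >>
    rw [pvLoopA.eq_2, if_neg hsp, if_neg h2, if_neg h3, if_neg h4, if_pos hcond, ih (by simp)]
    simp only [Bool.and_eq_true, decide_eq_true_eq] at hcond h4
    obtain ⟨rfl, h1⟩ := hcond
    cases rest with
    | nil => simp at h1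
    | cons e r =>
      rw [pvTake1] at h1
      obtain rfl : e = '>' := by simpa using h1
      have hr : ¬ r.take 1 = ['>'] := by
        intro hx
        exact h4 ⟨rfl, by rw [pvTake2, hx]⟩
      have hb : (pvWsB '>' || pvSepB '>' || pvOpStartB ('>' :: '>' :: r)) = true := by
        simp [pvOpStartB, pvTake2, pvTake1]
      have hscan : pvScanB ('>' :: '>' :: r) = ">>" :: pvScanB (('>' :: r).drop 1) := by
        rw [pvScanB_gtgt r hr, pvDrop1]
      exact pvStep '>' ('>' :: r) (('>' :: r).drop 1) cur toks _ h hb hscan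
  | case8 c rest cur toks hsp h2 h3 h4 h5 hcond ih =>
    -- #+
    rw [pvLoopA.eq_2, if_neg hsp, if_neg h2, if_neg h3, if_neg h4, if_neg h5,
      if_pos hcond, ih (by simp)]
    simp only [Bool.and_eq_true, decide_eq_true_eq] at hcond
    obtain ⟨rfl, h1⟩ := hcond
    cases rest with
    | nil => simp at h1
    | cons e r =>
      rw [pvTake1] at h1
      obtain rfl : e = '+' := by simpa using h1
      have hb : (pvWsB '#' || pvSepB '#' || pvOpStartB ('#' :: '+' :: r)) = true := by
        simp [pvOpStartB, pvTake2, pvTake1]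
      have hscan : pvScanB ('#' :: '+' :: r)
          = String.ofList (pvCollectA (('+' :: r).drop 1) ['#', '+']).1
              :: pvScanB (pvCollectA (('+' :: r).drop 1) ['#', '+']).2 := by
        rw [pvScanB_imm '#' ('+' :: r) (by simp [pvTake1])]
        simp [pvCollectA_eq, pvDrop1, pvTake1]
      exact pvStep '#' ('+' :: r) (pvCollectA (('+' :: r).drop 1) ['#', '+']).2 cur toks _ h hb hscan
  | case9 c rest cur toks hsp h2 h3 h4 h5 h6 hcond ih =>
    -- #-
    rw [pvLoopA.eq_2, if_neg hsp, if_neg h2, if_neg h3, if_neg h4, if_neg h5, if_neg h6,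
      if_pos hcond, ih (by simp)]
    simp only [Bool.and_eq_true, decide_eq_true_eq] at hcond
    obtain ⟨rfl, h1⟩ := hcond
    cases rest with
    | nil => simp at h1
    | cons e r =>
      rw [pvTake1] at h1
      obtain rfl : e = '-' := by simpa using h1
      have hb : (pvWsB '#' || pvSepB '#' || pvOpStartB ('#' :: '-' :: r)) = true := by
        simp [pvOpStartB, pvTake2, pvTake1]
      have hscan : pvScanB ('#' :: '-' :: r)
          = String.ofList (pvCollectA (('-' :: r).drop 1) ['#', '-']).1
              :: pvScanB (pvCollectA (('-' :: r).drop 1) ['#', '-']).2 := by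
        rw [pvScanB_imm '#' ('-' :: r) (by simp [pvTake1])]
        simp [pvCollectA_eq, pvDrop1, pvTake1]
      exact pvStep '#' ('-' :: r) (pvCollectA (('-' :: r).drop 1) ['#', '-']).2 cur toks _ h hb hscan
  | case10 c rest cur toks hsp h2 h3 h4 h5 h6 h7 hcond ih =>
    -- single-char separators []()&|^
    rw [pvLoopA.eq_2, if_neg hsp, if_neg h2, if_neg h3, if_neg h4, if_neg h5, if_neg h6,
      if_neg h7, if_pos hcond, ih (by simp)]
    have hfacts := pvSepFacts c (by
      simp only [Bool.or_eq_true, decide_eq_true_eq] at hcond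
      rcases hcond with ((((((rfl | rfl) | rfl) | rfl) | rfl) | rfl) | rfl) <;> simp)
    obtain ⟨hws, hh, hne1, hne2, hne3, hne4, hsep⟩ := hfacts
    have hb : (pvWsB c || pvSepB c || pvOpStartB (c :: rest)) = true := by simp [hsep]
    exact pvStep c rest rest cur toks _ h hb
      (pvScanB_single c rest hws hh ⟨hne1, hne2, hne3, hne4⟩ hsep)
  | case11 c rest cur toks hsp h2 h3 h4 h5 h6 h7 h8 hcond hne ih =>
    -- + - as operator, pending word flushed
    rw [pvLoopA.eq_2, if_neg hsp, if_neg h2, if_neg h3, if_neg h4, if_neg h5, if_neg h6,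
      if_neg h7, if_neg h8, if_pos hcond, if_pos hne, ih (by simp)]
    rw [pvStrip_of_noWs cur h] at hne ⊢
    have hfacts := pvSepFacts c (by
      simp only [Bool.or_eq_true, decide_eq_true_eq] at hcond
      rcases hcond with rfl | rfl <;> simp)
    obtain ⟨hws, hh, hne1, hne2, hne3, hne4, hsep⟩ := hfacts
    have hb : (pvWsB c || pvSepB c || pvOpStartB (c :: rest)) = true := by simp [hsep]
    simp [pvSpecG, hne, pvWordB_pos c rest hb,
      pvScanB_single c rest hws hh ⟨hne1, hne2, hne3, hne4⟩ hsep]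
  | case12 c rest cur toks hsp h2 h3 h4 h5 h6 h7 h8 hcond hnn ih =>
    -- + - as operator, no pending word
    rw [pvLoopA.eq_2, if_neg hsp, if_neg h2, if_neg h3, if_neg h4, if_neg h5, if_neg h6,
      if_neg h7, if_neg h8, if_pos hcond, if_neg hnn, ih h]
    have hcur : cur = [] := by rw [pvStrip_of_noWs cur h] at hnn; simpa using hnn
    subst hcur
    have hfacts := pvSepFacts c (by
      simp only [Bool.or_eq_true, decide_eq_true_eq] at hcond
      rcases hcond with rfl | rfl <;> simp)
    obtain ⟨hws, hh, hne1, hne2, hne3, hne4, hsep⟩ := hfacts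
    simp [pvSpecG, pvScanB_single c rest hws hh ⟨hne1, hne2, hne3, hne4⟩ hsep]
  | case13 c rest cur toks hsp h2 h3 h4 h5 h6 h7 h8 h9 ih =>
    -- word character: current += c
    rw [pvLoopA.eq_2, if_neg hsp, if_neg h2, if_neg h3, if_neg h4, if_neg h5, if_neg h6,
      if_neg h7, if_neg h8, if_neg h9]
    have hcw : PySem.Chars.isspace c = false := by simpa using hsp
    have hnw : ∀ x ∈ cur ++ [c], PySem.Chars.isspace x = false := by
      intro x hx
      rcases List.mem_append.mp hx with hx | hx
      · exact h x hx
      · simp at hx; subst hx; exact hcw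
    rw [ih hnw]
    simp only [Bool.and_eq_true, Bool.or_eq_true, decide_eq_true_eq, not_and,
      not_or] at h2 h3 h4 h5 h6 h7 h8 h9
    obtain ⟨⟨⟨m1, m2⟩, m3⟩, m4⟩ := h2
    obtain ⟨⟨⟨⟨⟨⟨n1, n2⟩, n3⟩, n4⟩, n5⟩, n6⟩, n7⟩ := h8
    obtain ⟨n8, n9⟩ := h9
    have hsep : pvSepB c = false := by
      simp only [pvSepB]
      simp [n1, n2, n3, n4, n5, n6, n7, n8, n9]
    have hop : pvOpStartB (c :: rest) = false := by
      apply Bool.eq_false_iff.mpr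
      intro ht
      simp only [pvOpStartB, pvTake2, Bool.or_eq_true, decide_eq_true_eq,
        List.cons.injEq] at ht
      rcases ht with ((((((⟨a, b⟩ | ⟨a, b⟩) | ⟨a, b⟩) | ⟨a, b⟩) | ⟨a, b⟩) | ⟨a, b⟩) | ⟨a, b⟩) | ⟨a, b⟩
      · exact m1 (by rw [pvTake2, a, b])
      · exact m2 (by rw [pvTake2, a, b])
      · exact m3 (by rw [pvTake2, a, b])
      · exact m4 (by rw [pvTake2, a, b])
      · exact (h5 a) b
      · exact (h3 a) b
      · exact (h6 a) b
      · exact (h7 a) b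
    have hbnd : (pvWsB c || pvSepB c || pvOpStartB (c :: rest)) = false := by
      simp [pvWsB, hcw, hsep, hop]
    have hscan := pvScanB_word c rest hcw hsep hop
    by_cases hc : cur = []
    · subst hc
      simp [pvSpecG, pvWordB_neg c rest hbnd, hscan]
    · simp [pvSpecG, hc, pvWordB_neg c rest hbnd, hscan]

-- ===== the split side: split₀ of the spaced string is the scanner =====

-- an alphanumeric character is not whitespace
theorem pvAlnum_not_space (c : Char) (h : PySem.Chars.isalnum c = true) :
    PySem.Chars.isspace c = false := by
  simp only [PySem.Chars.isalnum, PySem.Chars.isalpha, PySem.Chars.isupper,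
    PySem.Chars.islower, PySem.Chars.isdigit, Bool.or_eq_true, Bool.and_eq_true,
    decide_eq_true_eq] at h
  have hb : (48 ≤ c.toNat ∧ c.toNat ≤ 57) ∨ (65 ≤ c.toNat ∧ c.toNat ≤ 90) ∨
      (97 ≤ c.toNat ∧ c.toNat ≤ 122) := by
    rcases h with (⟨a, b⟩ | ⟨a, b⟩) | ⟨a, b⟩
    · exact Or.inr (Or.inl ⟨Fin.mk_le_mk.mp a, Fin.mk_le_mk.mp b⟩)
    · exact Or.inr (Or.inr ⟨Fin.mk_le_mk.mp a, Fin.mk_le_mk.mp b⟩)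
    · exact Or.inl ⟨Fin.mk_le_mk.mp a, Fin.mk_le_mk.mp b⟩
  simp only [PySem.Chars.isspace, Bool.or_eq_false_iff, Bool.and_eq_false_iff,
    decide_eq_false_iff_not]
  omega

-- split₀.go consumes a run of non-whitespace characters into its buffer
theorem pvGoAppend (tok rest cur : List Char) (acc : List (List Char))
    (hns : ∀ c ∈ tok, PySem.Chars.isspace c = false) :
    PySem.Chars.split₀.go (tok ++ rest) cur acc
      = PySem.Chars.split₀.go rest (tok.reverse ++ cur) acc := by
  induction tok generalizing cur with
  | nil => simp
  | cons c t ih =>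
    rw [List.cons_append, PySem.Chars.split₀.go.eq_2,
      if_neg (by simp [hns c (by simp)]), ih (c :: cur) (by intro x hx; exact hns x (by simp [hx]))]
    simp

-- split₀.go at a padded token ' ' ++ tok ++ ' ' ++ rest: flush buffer, emit tok
theorem pvGoToken (tok rest' cur : List Char) (acc : List (List Char))
    (htok : tok ≠ []) (hns : ∀ c ∈ tok, PySem.Chars.isspace c = false) :
    PySem.Chars.split₀.go (' ' :: (tok ++ ' ' :: rest')) cur acc
      = PySem.Chars.split₀.go rest' []
          (tok :: (if cur = [] then acc else cur.reverse :: acc)) := by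
  rw [PySem.Chars.split₀.go.eq_2, if_pos (by decide)]
  by_cases hc : cur = []
  · rw [if_pos (by simp [hc]), pvGoAppend tok (' ' :: rest') [] acc hns,
      PySem.Chars.split₀.go.eq_2, if_pos (by decide), if_neg (by simp [htok])]
    simp [hc]
  · rw [if_neg (by simp [hc]), pvGoAppend tok (' ' :: rest') [] _ hns,
      PySem.Chars.split₀.go.eq_2, if_pos (by decide), if_neg (by simp [htok])]
    simp [hc]

-- the invariant: go over the spaced remainder, with a (reversed) pending word buffer
theorem pvSplitInv (l : List Char) (cur : List Char) (acc : List (List Char))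
    (hcur : ∀ c ∈ cur, PySem.Chars.isspace c = false) :
    (PySem.Chars.split₀.go (pvSpace l) cur acc).map String.ofList
      = acc.reverse.map String.ofList ++
        (if cur = [] then pvScanB l
         else String.ofList (cur.reverse ++ (pvWordB l).1) :: pvScanB (pvWordB l).2) := by
  induction l using pvSpace.induct generalizing cur acc with
  | case1 =>
    rw [pvSpace]
    rw [PySem.Chars.split₀.go.eq_1]
    by_cases hc : cur = []
    · simp [hc, pvScanB]
    · simp [hc, pvWordB, pvScanB]
  | case2 c rest hcond ih =>
    -- signed immediate
    simp only [Bool.and_eq_true, Bool.or_eq_true, decide_eq_true_eq] at hcond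
    obtain ⟨rfl, hsig⟩ := hcond
    have hcondb : (decide (('#' : Char) = '#')
        && (decide (rest.take 1 = ['+']) || decide (rest.take 1 = ['-']))) = true := by
      simpa using hsig
    rw [pvSpace, if_pos hcondb]
    have hns : ∀ x ∈ ('#' :: (rest.take 1 ++ (rest.drop 1).takeWhile PySem.Chars.isalnum)),
        PySem.Chars.isspace x = false := by
      intro x hx
      simp only [List.mem_cons, List.mem_append] at hx
      rcases hx with rfl | hx | hx
      · decide
      · rcases hsig with hs | hs <;> rw [hs] at hx <;> simp at hx <;> subst hx <;> decide
      · exact pvAlnum_not_space x (List.mem_takeWhile_imp hx)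
    rw [pvGoToken _ _ cur acc (by simp) hns, ih [] _ (by simp)]
    have hb : (pvWsB '#' || pvSepB '#' || pvOpStartB ('#' :: rest)) = true := by
      rcases hsig with hs | hs <;>
        · cases rest with
          | nil => simp at hs
          | cons d r =>
            rw [pvTake1] at hs
            simp only [List.cons.injEq] at hs
            simp [pvOpStartB, pvTake2, pvTake1, hs.1]
    have hscan := pvScanB_imm '#' rest hcondb
    by_cases hc : cur = []
    · simp [hc, hscan]
    · simp [hc, pvWordB_pos '#' rest hb, hscan]
  | case3 c rest h1 hcond ih =>
    -- >>>
    rw [pvSpace, if_neg h1, if_pos hcond]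
    rw [pvTake3] at hcond
    simp only [List.cons.injEq] at hcond
    obtain ⟨rfl, h2⟩ := hcond
    cases rest with
    | nil => simp [pvTake2] at h2
    | cons d r =>
      rw [pvTake2] at h2
      simp only [List.cons.injEq] at h2
      obtain ⟨rfl, h3⟩ := h2
      cases r with
      | nil => simp at h3
      | cons e r' =>
        rw [pvTake1] at h3
        obtain rfl : e = '>' := by simpa using h3
        rw [pvGoToken ['>', '>', '>'] _ cur acc (by simp)
          (by intro x hx; simp only [List.mem_cons, List.not_mem_nil, or_false] at hx; rcases hx with rfl | rfl | rfl <;> decide),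
          ih [] _ (by simp)]
        have hb : (pvWsB '>' || pvSepB '>' || pvOpStartB ('>' :: '>' :: '>' :: r')) = true := by
          simp [pvOpStartB, pvTake2, pvTake1]
        have hgg : (">>>" : String) = String.ofList ['>', '>', '>'] := rfl
        by_cases hc : cur = []
        · simp [hc, pvScanB_ggg, hgg]
        · simp [hc, pvWordB_pos _ _ hb, pvScanB_ggg, hgg]
  | case4 c rest h1 h2 hcond ih =>
    -- two-char operators == != >= <= >> <<
    rw [pvSpace, if_neg h1, if_neg h2, if_pos hcond]
    simp only [Bool.or_eq_true, decide_eq_true_eq] at hcond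
    have step : ∀ (d : Char) (r : List Char), rest = d :: r →
        (∀ x ∈ [c, d], PySem.Chars.isspace x = false) →
        (pvWsB c || pvSepB c || pvOpStartB (c :: rest)) = true →
        pvScanB (c :: rest) = String.ofList [c, d] :: pvScanB r →
        (PySem.Chars.split₀.go
            (' ' :: ((c :: rest).take 2 ++ ' ' :: pvSpace (rest.drop 1))) cur acc).map String.ofList
          = acc.reverse.map String.ofList ++
            (if cur = [] then pvScanB (c :: rest)
             else String.ofList (cur.reverse ++ (pvWordB (c :: rest)).1)
                :: pvScanB (pvWordB (c :: rest)).2) := by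
      intro d r hrest hns hb hscan
      subst hrest
      rw [pvTake2, pvTake1, pvGoToken [c, d] _ cur acc (by simp) hns, ih [] _ (by simp)]
      by_cases hc : cur = []
      · simp [hc, hscan]
      · simp [hc, pvWordB_pos _ _ hb, hscan]
    rcases hcond with ((((hx | hx) | hx) | hx) | hx) | hx
    · rw [pvTake2] at hx
      simp only [List.cons.injEq] at hx
      obtain ⟨rfl, hy⟩ := hx
      cases rest with
      | nil => simp at hy
      | cons d r =>
        rw [pvTake1] at hy
        simp only [List.cons.injEq] at hy
        obtain ⟨rfl, -⟩ := hy
        refine step '=' r rfl (by intro x hx; simp only [List.mem_cons, List.not_mem_nil, or_false] at hx; rcases hx with rfl | rfl <;> decide)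
          (by simp [pvOpStartB, pvTake2, pvTake1]) (pvScanB_cmp '=' r (by simp))
    · rw [pvTake2] at hx
      simp only [List.cons.injEq] at hx
      obtain ⟨rfl, hy⟩ := hx
      cases rest with
      | nil => simp at hy
      | cons d r =>
        rw [pvTake1] at hy
        simp only [List.cons.injEq] at hy
        obtain ⟨rfl, -⟩ := hy
        refine step '=' r rfl (by intro x hx; simp only [List.mem_cons, List.not_mem_nil, or_false] at hx; rcases hx with rfl | rfl <;> decide)
          (by simp [pvOpStartB, pvTake2, pvTake1]) (pvScanB_cmp '!' r (by simp))
    · rw [pvTake2] at hx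
      simp only [List.cons.injEq] at hx
      obtain ⟨rfl, hy⟩ := hx
      cases rest with
      | nil => simp at hy
      | cons d r =>
        rw [pvTake1] at hy
        simp only [List.cons.injEq] at hy
        obtain ⟨rfl, -⟩ := hy
        refine step '=' r rfl (by intro x hx; simp only [List.mem_cons, List.not_mem_nil, or_false] at hx; rcases hx with rfl | rfl <;> decide)
          (by simp [pvOpStartB, pvTake2, pvTake1]) (pvScanB_cmp '>' r (by simp))
    · rw [pvTake2] at hx
      simp only [List.cons.injEq] at hx
      obtain ⟨rfl, hy⟩ := hx
      cases rest with
      | nil => simp at hy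
      | cons d r =>
        rw [pvTake1] at hy
        simp only [List.cons.injEq] at hy
        obtain ⟨rfl, -⟩ := hy
        refine step '=' r rfl (by intro x hx; simp only [List.mem_cons, List.not_mem_nil, or_false] at hx; rcases hx with rfl | rfl <;> decide)
          (by simp [pvOpStartB, pvTake2, pvTake1]) (pvScanB_cmp '<' r (by simp))
    · rw [pvTake2] at hx
      simp only [List.cons.injEq] at hx
      obtain ⟨rfl, hy⟩ := hx
      cases rest with
      | nil => simp at hy
      | cons d r =>
        rw [pvTake1] at hy
        simp only [List.cons.injEq] at hy
        obtain ⟨rfl, -⟩ := hy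
        refine step '>' r rfl (by intro x hx; simp only [List.mem_cons, List.not_mem_nil, or_false] at hx; rcases hx with rfl | rfl <;> decide)
          (by simp [pvOpStartB, pvTake2, pvTake1])
          (pvScanB_gtgt r (by
            intro hz
            exact h2 (by rw [pvTake3, pvTake2, hz])))
    · rw [pvTake2] at hx
      simp only [List.cons.injEq] at hx
      obtain ⟨rfl, hy⟩ := hx
      cases rest with
      | nil => simp at hy
      | cons d r =>
        rw [pvTake1] at hy
        simp only [List.cons.injEq] at hy
        obtain ⟨rfl, -⟩ := hy
        refine step '<' r rfl (by intro x hx; simp only [List.mem_cons, List.not_mem_nil, or_false] at hx; rcases hx with rfl | rfl <;> decide)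
          (by simp [pvOpStartB, pvTake2]) (pvScanB_ltlt r)
  | case5 c rest h1 h2 h3 hcond ih =>
    -- single-char separator
    rw [pvSpace, if_neg h1, if_neg h2, if_neg h3, if_pos hcond]
    have hlist : c = '[' ∨ c = ']' ∨ c = '(' ∨ c = ')' ∨ c = '&' ∨ c = '|' ∨ c = '^' ∨
        c = '+' ∨ c = '-' := by
      simp only [pvSepB, Bool.or_eq_true, decide_eq_true_eq] at hcond
      tauto
    obtain ⟨hws, hh, hne1, hne2, hne3, hne4, hsep⟩ := pvSepFacts c hlist
    rw [pvGoToken _ _ cur acc (by simp) (by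
      intro x hx
      simp only [List.mem_singleton] at hx
      subst hx
      simpa [pvWsB] using hws), ih [] _ (by simp)]
    have hb : (pvWsB c || pvSepB c || pvOpStartB (c :: rest)) = true := by simp [hsep]
    have hscan := pvScanB_single c rest hws hh ⟨hne1, hne2, hne3, hne4⟩ hsep
    by_cases hc : cur = []
    · simp [hc, hscan]
    · simp [hc, pvWordB_pos _ _ hb, hscan]
  | case6 c rest h1 h2 h3 h4 ih =>
    -- unmatched character, copied unchanged
    rw [pvSpace, if_neg h1, if_neg h2, if_neg h3, if_neg h4]
    by_cases hsp : PySem.Chars.isspace c = true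
    · rw [PySem.Chars.split₀.go.eq_2, if_pos hsp]
      have hb : (pvWsB c || pvSepB c || pvOpStartB (c :: rest)) = true := by
        simp [pvWsB, hsp]
      by_cases hc : cur = []
      · rw [if_pos (by simp [hc]), ih [] acc (by simp)]
        simp [hc, pvScanB_ws c rest (by simpa [pvWsB] using hsp)]
      · rw [if_neg (by simp [hc]), ih [] _ (by simp)]
        simp [hc, pvWordB_pos _ _ hb, pvScanB_ws c rest (by simpa [pvWsB] using hsp)]
    · have hcw : PySem.Chars.isspace c = false := by simpa using hsp
      rw [PySem.Chars.split₀.go.eq_2, if_neg (by simp [hcw]),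
        ih (c :: cur) acc (by
          intro x hx
          rcases List.mem_cons.mp hx with rfl | hx
          · exact hcw
          · exact hcur x hx)]
      have hsep : pvSepB c = false := by simpa using h4
      have hop : pvOpStartB (c :: rest) = false := by
        apply Bool.eq_false_iff.mpr
        intro ht
        simp only [Bool.and_eq_true, Bool.or_eq_true, decide_eq_true_eq, not_and,
          not_or] at h1 h3
        simp only [pvOpStartB, Bool.or_eq_true, decide_eq_true_eq] at ht
        rcases ht with ((((((hx | hx) | hx) | hx) | hx) | hx) | hx) | hx
        · exact h3.1.1.1.1.1 hx
        · exact h3.1.1.1.1.2 hx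
        · exact h3.1.1.1.2 hx
        · exact h3.1.1.2 hx
        · exact h3.1.2 hx
        · exact h3.2 hx
        · rw [pvTake2] at hx
          simp only [List.cons.injEq] at hx
          exact (h1 hx.1).1 hx.2
        · rw [pvTake2] at hx
          simp only [List.cons.injEq] at hx
          exact (h1 hx.1).2 hx.2
      have hbnd : (pvWsB c || pvSepB c || pvOpStartB (c :: rest)) = false := by
        simp [pvWsB, hcw, hsep, hop]
      have hscan := pvScanB_word c rest hcw hsep hop
      by_cases hc : cur = []
      · simp [hc, hscan]
      · simp [hc, pvWordB_neg c rest hbnd]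

-- ===== VERDICT (by name: the statement is the Claim_ definition above) =====
theorem tokenize_operands_spec : Claim_equal_tokenize_operands := by
  intro s _
  unfold Spec_tokenize_operands tokenize_operands tokenize_operands_alt
  rw [pvMain s.toList [] [] (by simp)]
  simp only [PySem.Str.split₀, String.toList_ofList, PySem.Chars.split₀]
  rw [pvSplitInv s.toList [] [] (by simp)]
  simp [pvSpecG]
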